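-- pv_equiv track=rewrite | github.com/manuelafba/programacao-I | 1ª avaliação/lista 1 funções/ex11.py | achar_idx_maior_primo
-- ===== SOURCE A (Python) =====
-- def detectar_numero_primo(numero):
--     """
--     Verifica se o número é primo a partir da quantidade de divisores
--
--     Argumentos:
--     - numero: número inteiro
--
--     Retorno: Valor booleano True se o número for primo ou False caso não seja
--     """
--     for divisor in range(2, numero):
--         if (numero % divisor == 0):
--             return False
--     return True
--
-- def achar_idx_maior_primo(lista_inteiros):
--     """
--     Encontra o índice do maior número primo em uma lista
--
--     Argumentos:
--     - lista_inteiros: uma lista de números inteiros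
--
--     Retorno:
--     - maior_primo: o maior número primo na lista
--     - indice_maior_primo: o índice maior número primo na lista. O valor será -1 caso não exitam números primos na lista
--     """
--     lista_primos = []
--     maior_primo = 0
--     indice_maior_primo = 0
--
--     for item in lista_inteiros:
--         if detectar_numero_primo(item):
--             lista_primos.append(item)
--             maior_primo = max(lista_primos)
--             indice_maior_primo = lista_inteiros.index(maior_primo)
--
--     if len(lista_primos) == 0:
--         return -1, -1
--
--     return maior_primo, indice_maior_primo
-- ===== SOURCE B (Python) =====
-- def eh_primo(n):
--     # same pseudo-primality as range(2, n): every n <= 2 counts as prime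
--     if n <= 2:
--         return True
--     d = 2
--     while d * d <= n:
--         if n % d == 0:
--             return False
--         d += 1
--     return True
--
-- def achar_idx_maior_primo(lista_inteiros):
--     maior_primo = -1
--     indice_maior_primo = -1
--     i = 0
--     for item in lista_inteiros:
--         if (indice_maior_primo < 0 or item > maior_primo) and eh_primo(item):
--             maior_primo = item
--             indice_maior_primo = i
--         i += 1
--     return maior_primo, indice_maior_primo
-- ===== Notes on version B (the rewrite author's own statement) =====
-- stated objective: faster
-- what changed: Single left-to-right pass tracking the current max 'prime' and its first index (no prime list, no max() recomputation, no list.index rescan), with trial division only up to sqrt(n) instead of up to n.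
import Mathlib
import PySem

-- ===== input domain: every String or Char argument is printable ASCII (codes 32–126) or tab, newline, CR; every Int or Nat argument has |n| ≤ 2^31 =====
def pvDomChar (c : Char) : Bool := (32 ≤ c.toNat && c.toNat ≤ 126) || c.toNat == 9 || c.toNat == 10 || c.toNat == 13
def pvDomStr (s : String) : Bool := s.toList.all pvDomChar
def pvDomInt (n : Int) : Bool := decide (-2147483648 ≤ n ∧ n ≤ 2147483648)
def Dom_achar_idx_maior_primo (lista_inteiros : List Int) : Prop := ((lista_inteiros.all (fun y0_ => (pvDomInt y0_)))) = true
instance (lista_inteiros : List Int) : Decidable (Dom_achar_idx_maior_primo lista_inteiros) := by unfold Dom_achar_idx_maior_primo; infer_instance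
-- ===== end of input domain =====

-- B replaces A's per-element rescans (prime list + max() + list.index, trial division up to n)
-- with one pass tracking the running max "prime" and its first index, trial division only up to sqrt(n). Objective: faster.

-- ===== PORT A =====
-- 'for divisor in range(2, numero): if numero % divisor == 0: return False' — Python's range is
-- lazy and the loop returns early, so it is ported as this recursion over divisor (exact)
def detectarGo (numero divisor : Int) : Bool :=
  if divisor < numero then
    if PySem.Int.mod numero divisor == 0 then false
    else detectarGo numero (divisor + 1)
  else true
termination_by (numero - divisor).toNat
decreasing_by omega

def detectar_numero_primo (numero : Int) : Bool := detectarGo numero 2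

def achar_idx_maior_primo (lista_inteiros : List Int) : Int × Int :=
  let st := lista_inteiros.foldl
    (fun (s : List Int × Int × Int) item =>
      if detectar_numero_primo item then
        let lista_primos := s.1 ++ [item]
        -- max() of the nonempty lista_primos never raises; the .getD 0 is unreachable
        let maior := (PySem.List.max? lista_primos (fun y => y)).getD 0
        -- maior is an element of lista_inteiros, so list.index never raises; the .getD 0 is unreachable
        let idx := ((PySem.List.index? lista_inteiros maior).map (Int.ofNat)).getD 0
        (lista_primos, maior, idx)
      else s)
    ([], 0, 0)
  if st.1.length == 0 then (-1, -1) else (st.2.1, st.2.2)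

-- ===== PORT B =====
-- the 'while d * d <= n' loop of Source B's eh_primo
def ehPrimoGo (n d : Int) : Bool :=
  if h : d * d ≤ n then
    if PySem.Int.mod n d == 0 then false
    else ehPrimoGo n (d + 1)
  else true
termination_by (n + 1 - d).toNat
decreasing_by
  have hd : d ≤ d * d := by
    rcases Int.lt_or_le d 1 with h' | h' <;> nlinarith [mul_self_nonneg d]
  omega

def eh_primo (n : Int) : Bool :=
  if n ≤ 2 then true else ehPrimoGo n 2

def achar_idx_maior_primo_alt (lista_inteiros : List Int) : Int × Int :=
  let st := lista_inteiros.foldl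
    (fun (s : Int × Int × Int) item =>
      if (decide (s.2.1 < 0) || decide (s.1 < item)) && eh_primo item
      then (item, s.2.2, s.2.2 + 1)
      else (s.1, s.2.1, s.2.2 + 1))
    (-1, -1, 0)
  (st.1, st.2.1)

-- ===== PRECONDITION & SPEC =====
def Spec_achar_idx_maior_primo (lista_inteiros : List Int) (out : Int × Int) : Prop := out = achar_idx_maior_primo_alt lista_inteiros
instance (lista_inteiros : List Int) (out : Int × Int) : Decidable (Spec_achar_idx_maior_primo lista_inteiros out) := by unfold Spec_achar_idx_maior_primo; infer_instance

-- ===== CLAIM (what is proved, stated in full; the proofs are below) =====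
def Claim_equal_achar_idx_maior_primo : Prop := ∀ (lista_inteiros : List Int), Dom_achar_idx_maior_primo lista_inteiros → Spec_achar_idx_maior_primo lista_inteiros (achar_idx_maior_primo lista_inteiros)

-- ===== LEMMAS AND PROOFS =====

-- A's divisor loop tests all e with d ≤ e < n
theorem detectarGo_iff (n d : Int) :
    detectarGo n d = true ↔ ∀ e : Int, d ≤ e → e < n → ¬ (e ∣ n) := by
  fun_induction detectarGo n d with
  | case1 d h hmod =>
    simp only [Bool.false_eq_true, false_iff]
    push Not
    exact ⟨d, le_refl d, h, (PySem.Int.mod_eq_zero_iff_dvd n d).mp (by simpa using hmod)⟩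
  | case2 d h hmod ih =>
    rw [ih]
    constructor
    · intro H e he hlt
      rcases eq_or_lt_of_le he with heq | he'
      · cases heq
        intro hdvd
        exact hmod (by simp [(PySem.Int.mod_eq_zero_iff_dvd n d).mpr hdvd])
      · exact H e (by omega) hlt
    · intro H e he hlt
      exact H e (by omega) hlt
  | case3 d h =>
    simp only [true_iff]
    intro e he hlt hdvd
    omega

-- the trial-division loop of B tests all e with d ≤ e, e*e ≤ n (for positive d)
theorem ehPrimoGo_iff (n d : Int) :
    1 ≤ d → (ehPrimoGo n d = true ↔ ∀ e : Int, d ≤ e → e * e ≤ n → ¬ (e ∣ n)) := by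
  fun_induction ehPrimoGo n d with
  | case1 d h hmod =>
    intro hd
    simp only [Bool.false_eq_true, false_iff]
    push Not
    refine ⟨d, le_refl d, h, ?_⟩
    exact (PySem.Int.mod_eq_zero_iff_dvd n d).mp (by simpa using hmod)
  | case2 d h hmod ih =>
    intro hd
    rw [ih (by omega)]
    constructor
    · intro H e he hsq
      rcases eq_or_lt_of_le he with heq | he'
      · cases heq
        intro hdvd
        exact hmod (by simp [(PySem.Int.mod_eq_zero_iff_dvd n d).mpr hdvd])
      · exact H e (by omega) hsq
    · intro H e he hsq
      exact H e (by omega) hsq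
  | case3 d h =>
    intro hd
    simp only [true_iff]
    intro e he hsq
    exfalso
    have : d * d ≤ e * e := by nlinarith
    omega

-- A's primality test equals B's on every integer
theorem detectar_eq_eh_primo : detectar_numero_primo = eh_primo := by
  funext n
  by_cases h2 : n ≤ 2
  · show detectarGo n 2 = eh_primo n
    rw [eh_primo, if_pos h2, detectarGo, if_neg (by omega : ¬ (2:Int) < n)]
  · have h3 : (3 : Int) ≤ n := by omega
    have hA : detectar_numero_primo n = true ↔ ∀ e : Int, 2 ≤ e → e < n → ¬ e ∣ n :=
      detectarGo_iff n 2
    have hB : eh_primo n = true ↔ ∀ e : Int, 2 ≤ e → e * e ≤ n → ¬ e ∣ n := by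
      rw [eh_primo, if_neg h2]
      exact ehPrimoGo_iff n 2 (by omega)
    have hbridge : (∀ e : Int, 2 ≤ e → e < n → ¬ e ∣ n) ↔
        (∀ e : Int, 2 ≤ e → e * e ≤ n → ¬ e ∣ n) := by
      constructor
      · intro H e he hsq
        exact H e he (by nlinarith)
      · intro H e he hlt hdvd
        obtain ⟨k, hk⟩ := hdvd
        have hkpos : 0 < k := by nlinarith
        have hk1 : k ≠ 1 := by rintro rfl; omega
        have hk2 : 2 ≤ k := by omega
        rcases le_total e k with hek | hek
        · exact H e he (by nlinarith) ⟨k, hk⟩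
        · exact H k hk2 (by nlinarith) ⟨e, by rw [hk]; ring⟩
    rw [Bool.eq_iff_iff, hA, hB]
    exact hbridge

-- canonical value both folds compute
def ppMax? (t : List Int) : Option Int := PySem.List.max? (t.filter eh_primo) (fun y => y)

def canonIdx (L : List Int) (M : Int) : Int := ((PySem.List.index? L M).map (Int.ofNat)).getD 0

theorem max?_id_nil : PySem.List.max? ([] : List Int) (fun y => y) = none :=
  (PySem.List.max?_eq_none_iff _ _).mpr rfl

theorem maxApp_none {l : List Int} (x : Int)
    (h : PySem.List.max? l (fun y => y) = none) :
    PySem.List.max? (l ++ [x]) (fun y => y) = some x := by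
  have : l = [] := (PySem.List.max?_eq_none_iff _ _).mp h
  subst this
  simp [PySem.List.max?_id_cons]

theorem maxApp_some {l : List Int} {m : Int} (x : Int)
    (h : PySem.List.max? l (fun y => y) = some m) :
    PySem.List.max? (l ++ [x]) (fun y => y) = some (max m x) := by
  cases l with
  | nil => simp [max?_id_nil] at h
  | cons a tl =>
    rw [PySem.List.max?_id_cons] at h
    rw [List.cons_append, PySem.List.max?_id_cons, List.foldl_append]
    simp_all

-- A's fold state after prefix t of L (with detectar rewritten to eh_primo)
def stA (L t : List Int) : List Int × Int × Int :=
  match ppMax? t with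
  | none => (t.filter eh_primo, 0, 0)
  | some M => (t.filter eh_primo, M, canonIdx L M)

def stepA (L : List Int) (s : List Int × Int × Int) (item : Int) : List Int × Int × Int :=
  if eh_primo item then
    let lista_primos := s.1 ++ [item]
    let maior := (PySem.List.max? lista_primos (fun y => y)).getD 0
    let idx := ((PySem.List.index? L maior).map (Int.ofNat)).getD 0
    (lista_primos, maior, idx)
  else s

-- B's fold state after prefix t
def stB (t : List Int) : Int × Int × Int :=
  match ppMax? t with
  | none => (-1, -1, (t.length : Int))
  | some M => (M, ((PySem.List.index? t M).map (Int.ofNat)).getD 0, (t.length : Int))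

def stepB (s : Int × Int × Int) (item : Int) : Int × Int × Int :=
  if (decide (s.2.1 < 0) || decide (s.1 < item)) && eh_primo item
  then (item, s.2.2, s.2.2 + 1)
  else (s.1, s.2.1, s.2.2 + 1)

theorem stA_nil (L : List Int) : stA L [] = ([], 0, 0) := by
  unfold stA ppMax?
  rw [show ([] : List Int).filter eh_primo = [] from rfl, max?_id_nil]

theorem stB_nil : stB [] = (-1, -1, 0) := by
  unfold stB ppMax?
  rw [show ([] : List Int).filter eh_primo = [] from rfl, max?_id_nil]
  rfl

theorem not_mem_of_filter_notin {t : List Int} {x : Int} (hx : eh_primo x = true)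
    (h : x ∉ t.filter eh_primo) : x ∉ t :=
  fun hmem => h (List.mem_filter.mpr ⟨hmem, hx⟩)

theorem stepA_st (L t : List Int) (x : Int) : stepA L (stA L t) x = stA L (t ++ [x]) := by
  by_cases hx : eh_primo x = true
  · have hf : (t ++ [x]).filter eh_primo = t.filter eh_primo ++ [x] := by
      simp [List.filter_append, hx]
    unfold stA ppMax?
    rw [hf]
    cases hm : PySem.List.max? (t.filter eh_primo) (fun y => y) with
    | none =>
      rw [maxApp_none x hm]
      simp [stepA, hx, maxApp_none x hm, canonIdx, PySem.List.index?_eq_idxOf?]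
    | some M =>
      rw [maxApp_some x hm]
      simp [stepA, hx, maxApp_some x hm, canonIdx, PySem.List.index?_eq_idxOf?]
  · have hf : (t ++ [x]).filter eh_primo = t.filter eh_primo := by
      simp [List.filter_append, hx]
    unfold stA ppMax?
    rw [hf]
    cases hm : PySem.List.max? (t.filter eh_primo) (fun y => y) with
    | none => simp [stepA, hx]
    | some M => simp [stepA, hx]

theorem stepB_st (t : List Int) (x : Int) : stepB (stB t) x = stB (t ++ [x]) := by
  by_cases hx : eh_primo x = true
  · have hf : (t ++ [x]).filter eh_primo = t.filter eh_primo ++ [x] := by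
      simp [List.filter_append, hx]
    unfold stB ppMax?
    rw [hf]
    cases hm : PySem.List.max? (t.filter eh_primo) (fun y => y) with
    | none =>
      have hfil : t.filter eh_primo = [] := (PySem.List.max?_eq_none_iff _ _).mp hm
      have hxt : x ∉ t := not_mem_of_filter_notin hx (by simp [hfil])
      have hidx := PySem.List.index?_append_singleton_self t x hxt
      simp only [PySem.List.index?_eq_idxOf?] at hidx
      rw [maxApp_none x hm]
      simp [stepB, hx, hidx]
    | some M =>
      have hMfil : M ∈ t.filter eh_primo := PySem.List.max?_mem hm
      have hMt : M ∈ t := (List.mem_filter.mp hMfil).1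
      have hMmax : ∀ y ∈ t.filter eh_primo, y ≤ M := fun y hy =>
        PySem.List.max?_isMax hm y hy
      obtain ⟨k, hk⟩ := Option.isSome_iff_exists.mp
        ((PySem.List.index?_isSome_iff _ _).mpr hMt)
      simp only [PySem.List.index?_eq_idxOf?] at hk
      by_cases hgt : M < x
      · have hxt : x ∉ t := by
          intro hmem
          have : x ≤ M := hMmax x (List.mem_filter.mpr ⟨hmem, hx⟩)
          omega
        have hidx := PySem.List.index?_append_singleton_self t x hxt
        simp only [PySem.List.index?_eq_idxOf?] at hidx
        rw [maxApp_some x hm, max_eq_right (le_of_lt hgt)]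
        simp [stepB, hx, hk, hgt, hidx]
      · have hidx := PySem.List.index?_append_of_mem [x] hMt
        simp only [PySem.List.index?_eq_idxOf?] at hidx
        rw [maxApp_some x hm, max_eq_left (by omega)]
        simp [stepB, hx, hk, hgt, hidx]
  · have hf : (t ++ [x]).filter eh_primo = t.filter eh_primo := by
      simp [List.filter_append, hx]
    unfold stB ppMax?
    rw [hf]
    cases hm : PySem.List.max? (t.filter eh_primo) (fun y => y) with
    | none => simp [stepB, hx]
    | some M =>
      have hMt : M ∈ t := (List.mem_filter.mp (PySem.List.max?_mem hm)).1
      obtain ⟨k, hk⟩ := Option.isSome_iff_exists.mp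
        ((PySem.List.index?_isSome_iff _ _).mpr hMt)
      simp only [PySem.List.index?_eq_idxOf?] at hk
      have hidx := PySem.List.index?_append_of_mem [x] hMt
      simp only [PySem.List.index?_eq_idxOf?] at hidx
      simp [stepB, hx, hk, hidx]

theorem foldA (L : List Int) : ∀ (r t : List Int),
    r.foldl (stepA L) (stA L t) = stA L (t ++ r) := by
  intro r
  induction r with
  | nil => intro t; simp
  | cons x r ih =>
    intro t
    calc (x :: r).foldl (stepA L) (stA L t)
        = r.foldl (stepA L) (stepA L (stA L t) x) := rfl
      _ = r.foldl (stepA L) (stA L (t ++ [x])) := by rw [stepA_st]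
      _ = stA L ((t ++ [x]) ++ r) := ih (t ++ [x])
      _ = stA L (t ++ x :: r) := by simp

theorem foldB : ∀ (r t : List Int), r.foldl stepB (stB t) = stB (t ++ r) := by
  intro r
  induction r with
  | nil => intro t; simp
  | cons x r ih =>
    intro t
    calc (x :: r).foldl stepB (stB t)
        = r.foldl stepB (stepB (stB t) x) := rfl
      _ = r.foldl stepB (stB (t ++ [x])) := by rw [stepB_st]
      _ = stB ((t ++ [x]) ++ r) := ih (t ++ [x])
      _ = stB (t ++ x :: r) := by simp

theorem A_canon (L : List Int) : achar_idx_maior_primo L =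
    (match ppMax? L with
     | none => (-1, -1)
     | some M => (M, canonIdx L M)) := by
  have hA : achar_idx_maior_primo L =
      (let st := L.foldl (stepA L) ([], 0, 0);
       if st.1.length == 0 then ((-1 : Int), (-1 : Int)) else (st.2.1, st.2.2)) := by
    unfold achar_idx_maior_primo stepA
    rw [detectar_eq_eh_primo]
  rw [hA]
  have hfold : L.foldl (stepA L) ([], 0, 0) = stA L L := by
    rw [← stA_nil L, foldA L L []]
    simp
  rw [hfold]
  unfold stA
  cases hm : ppMax? L with
  | none =>
    have hfil : L.filter eh_primo = [] := by
      unfold ppMax? at hm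
      exact (PySem.List.max?_eq_none_iff _ _).mp hm
    simp [hfil]
  | some M =>
    have hfil : L.filter eh_primo ≠ [] := by
      intro h
      unfold ppMax? at hm
      rw [h, max?_id_nil] at hm
      simp at hm
    simp [List.length_eq_zero_iff, hfil]

theorem B_canon (L : List Int) : achar_idx_maior_primo_alt L =
    (match ppMax? L with
     | none => (-1, -1)
     | some M => (M, canonIdx L M)) := by
  have hB : achar_idx_maior_primo_alt L =
      (let st := L.foldl stepB (-1, -1, 0); (st.1, st.2.1)) := rfl
  rw [hB]
  have hfold : L.foldl stepB (-1, -1, 0) = stB L := by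
    rw [← stB_nil, foldB L []]
    simp
  rw [hfold]
  unfold stB
  cases hm : ppMax? L with
  | none => simp
  | some M => simp [canonIdx]

-- ===== VERDICT (by name: the statement is the Claim_ definition above) =====
theorem achar_idx_maior_primo_spec : Claim_equal_achar_idx_maior_primo := by
  intro L _
  show achar_idx_maior_primo L = achar_idx_maior_primo_alt L
  rw [A_canon, B_canon]
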